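-- pv_equiv track=rewrite | github.com/yeripallivijay/DSA | Day4/Basic-Hashing.py | sumHighestAndLowestFrequency
-- ===== SOURCE A (Python) =====
-- def sumHighestAndLowestFrequency(nums):
--         n = len(nums)
--         maxFreq = 0
--         minFreq = n
--         mpp={}
--         for num in nums:
--             if num in mpp:
--                  mpp[num] += 1
--             else:
--                 mpp[num] = 1
--         for freq in mpp.values():
--             maxFreq = max(maxFreq,freq)
--             minFreq = min(minFreq,freq)
--         return maxFreq + minFreq
-- ===== SOURCE B (Python) =====
-- def sumHighestAndLowestFrequency(nums):
--     # sort, then run-length the sorted list; no hash map, no running extrema loop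
--     freqs = []
--     prev = None
--     for x in sorted(nums):
--         if freqs and x == prev:
--             freqs[-1] += 1
--         else:
--             freqs.append(1)
--             prev = x
--     if not freqs:
--         return 0
--     return max(freqs) + min(freqs)
-- ===== Notes on version B (the rewrite author's own statement) =====
-- stated objective: alternative
-- what changed: Replaces the hash-map counter and running max/min scan by sorting the list and run-length-encoding the sorted runs, then taking max(freqs)+min(freqs) with an explicit empty guard.
import Mathlib
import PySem

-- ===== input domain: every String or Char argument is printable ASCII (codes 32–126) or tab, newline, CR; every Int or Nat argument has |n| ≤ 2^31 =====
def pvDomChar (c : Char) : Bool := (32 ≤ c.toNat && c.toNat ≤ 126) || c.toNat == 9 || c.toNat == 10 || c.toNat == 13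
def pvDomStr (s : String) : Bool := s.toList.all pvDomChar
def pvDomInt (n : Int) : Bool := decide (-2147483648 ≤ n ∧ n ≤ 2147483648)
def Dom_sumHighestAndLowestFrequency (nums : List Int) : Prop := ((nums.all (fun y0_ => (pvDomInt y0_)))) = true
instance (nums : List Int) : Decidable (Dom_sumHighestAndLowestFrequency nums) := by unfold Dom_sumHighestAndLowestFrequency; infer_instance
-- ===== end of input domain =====

-- B replaces the hash-map counter and the running max/min scan by sort + run-length
-- encoding of the sorted runs (an "alternative" decomposition, not claimed faster).

-- ===== PORT A =====
def sumHighestAndLowestFrequency (nums : List Int) : Int :=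
  let n : Int := nums.length
  let mpp := nums.foldl
    (fun (d : PySem.Dict Int Int) num =>
      if d.contains num then d.insert num (d.getD num 0 + 1) else d.insert num 1)
    PySem.Dict.empty
  let p := mpp.values.foldl (fun (mf : Int × Int) freq => (max mf.1 freq, min mf.2 freq)) (0, n)
  p.1 + p.2

-- ===== PORT B =====
-- freqs[-1] += 1 on a nonempty list: increment the last element (empty case unreachable)
def pvIncLast : List Int → List Int
  | [] => []
  | [a] => [a + 1]
  | a :: b :: t => a :: pvIncLast (b :: t)

-- loop body of Source B: state is (freqs, prev); 'prev = None' is 'none'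
def pvGroupStep (st : List Int × Option Int) (x : Int) : List Int × Option Int :=
  if st.1 ≠ [] ∧ st.2 = some x then (pvIncLast st.1, st.2) else (st.1 ++ [1], some x)

def sumHighestAndLowestFrequency_alt (nums : List Int) : Int :=
  let s := PySem.List.sorted nums (fun x => x) false
  let st := s.foldl pvGroupStep ([], none)
  if st.1 = [] then 0
  else (PySem.List.max? st.1 (fun y => y)).getD 0 + (PySem.List.min? st.1 (fun y => y)).getD 0

-- ===== PRECONDITION & SPEC =====
def Spec_sumHighestAndLowestFrequency (nums : List Int) (out : Int) : Prop := out = sumHighestAndLowestFrequency_alt nums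
instance (nums : List Int) (out : Int) : Decidable (Spec_sumHighestAndLowestFrequency nums out) := by unfold Spec_sumHighestAndLowestFrequency; infer_instance

-- ===== CLAIM (what is proved, stated in full; the proofs are below) =====
def Claim_equal_sumHighestAndLowestFrequency : Prop := ∀ (nums : List Int), Dom_sumHighestAndLowestFrequency nums → Spec_sumHighestAndLowestFrequency nums (sumHighestAndLowestFrequency nums)

-- ===== LEMMAS AND PROOFS =====

-- run lengths of a (sorted) list, one run at a time
def runsSpec : List Int → List Int
  | [] => []
  | a :: t => ((t.takeWhile (· == a)).length + 1 : Int) :: runsSpec (t.dropWhile (· == a))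
termination_by s => s.length
decreasing_by
  have h := (List.dropWhile_sublist (p := (· == a)) (l := t)).length_le
  simp; omega

theorem pvIncLast_append (fs : List Int) (c : Int) : pvIncLast (fs ++ [c]) = fs ++ [c + 1] := by
  induction fs with
  | nil => simp [pvIncLast]
  | cons a t ih =>
    cases t with
    | nil => simp [pvIncLast]
    | cons b u => simpa [pvIncLast] using ih

theorem fold_group (s : List Int) (hs : s.Pairwise (· ≤ ·)) :
    ∀ (fs : List Int) (c p : Int), (∀ y ∈ s, p ≤ y) →
      (s.foldl pvGroupStep (fs ++ [c], some p)).1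
        = fs ++ ((c + ((s.takeWhile (· == p)).length : Int)) :: runsSpec (s.dropWhile (· == p))) := by
  induction s with
  | nil => intro fs c p _; simp [runsSpec]
  | cons x t ih =>
    intro fs c p hp
    rw [List.pairwise_cons] at hs
    obtain ⟨hx, ht⟩ := hs
    by_cases hxp : p = x
    · subst hxp
      have hstep : pvGroupStep (fs ++ [c], some p) p = (fs ++ [c + 1], some p) := by
        simp [pvGroupStep, pvIncLast_append]
      rw [List.foldl_cons, hstep, ih ht fs (c + 1) p hx]
      have harith : (c + 1 + ((t.takeWhile (· == p)).length : Int))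
          = c + (((p :: t).takeWhile (· == p)).length : Int) := by
        simp; ring
      rw [List.dropWhile_cons]
      simp only [BEq.rfl, if_pos]
      rw [← harith]
    · have hstep : pvGroupStep (fs ++ [c], some p) x = ((fs ++ [c]) ++ [1], some x) := by
        have : ¬ (some p = some x) := by simpa using hxp
        simp [pvGroupStep, this]
      rw [List.foldl_cons, hstep, ih ht (fs ++ [c]) 1 x hx]
      have hxpb : (x == p) = false := by simpa using fun h => hxp h.symm
      rw [List.takeWhile_cons, List.dropWhile_cons]
      simp only [hxpb, if_neg, Bool.false_eq_true, not_false_eq_true]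
      rw [runsSpec]
      have harith : (1 + ((t.takeWhile (· == x)).length : Int))
          = ((t.takeWhile (· == x)).length : Int) + 1 := by ring
      rw [harith]
      simp

theorem fold_group_top (s : List Int) (hs : s.Pairwise (· ≤ ·)) :
    (s.foldl pvGroupStep ([], none)).1 = runsSpec s := by
  cases s with
  | nil => simp [runsSpec]
  | cons a t =>
    rw [List.pairwise_cons] at hs
    have hstep : pvGroupStep ([], none) a = (([] : List Int) ++ [1], some a) := by
      simp [pvGroupStep]
    rw [List.foldl_cons, hstep, fold_group t hs.2 [] 1 a hs.1, runsSpec]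
    have harith : (1 + ((t.takeWhile (· == a)).length : Int))
        = ((t.takeWhile (· == a)).length : Int) + 1 := by ring
    rw [harith]
    simp

theorem runsSpec_perm (n : Nat) : ∀ (s : List Int), s.length ≤ n → s.Pairwise (· ≤ ·) →
    (runsSpec s).Perm ((PySem.Set.ofList s : List Int).map (fun v => (s.count v : Int))) := by
  induction n with
  | zero =>
    intro s hlen _
    have : s = [] := List.eq_nil_of_length_eq_zero (Nat.le_zero.mp hlen)
    subst this
    simp [runsSpec]
  | succ n ih =>
    intro s hlen hs
    cases s with
    | nil => simp [runsSpec]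
    | cons a t =>
      rw [List.pairwise_cons] at hs
      obtain ⟨hat, htp⟩ := hs
      set t1 := t.takeWhile (· == a) with ht1def
      set t2 := t.dropWhile (· == a) with ht2def
      have h_t : t1 ++ t2 = t := List.takeWhile_append_dropWhile
      have hsub : t2.Sublist t := List.dropWhile_sublist _
      have hlen2 : t2.length ≤ n := by
        have h1 := hsub.length_le
        simp at hlen
        omega
      have ht2pair : t2.Pairwise (· ≤ ·) := htp.sublist hsub
      have ht1a : ∀ y ∈ t1, y = a := by
        intro y hy
        have := List.mem_takeWhile_imp hy
        simpa using this
      have ha_not_t2 : a ∉ t2 := by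
        intro ha
        cases ht2c : t2 with
        | nil => rw [ht2c] at ha; simp at ha
        | cons b u =>
          have hb : (b == a) = false := by
            have := List.head?_dropWhile_not (· == a) t
            rw [← ht2def, ht2c] at this
            simpa using this
          have hba : b ≠ a := by simpa using hb
          have hbt : b ∈ t := hsub.subset (by rw [ht2c]; exact List.mem_cons_self)
          have hab : a ≤ b := hat b hbt
          rw [ht2c] at ht2pair
          rw [List.pairwise_cons] at ht2pair
          rw [ht2c] at ha
          rcases List.mem_cons.mp ha with h | h
          · exact hba h.symm
          · have := ht2pair.1 a h
            exact hba (le_antisymm this hab)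
      have hv_ne : ∀ v ∈ t2, v ≠ a := by
        intro v hv hva
        exact ha_not_t2 (hva ▸ hv)
      have hcount_a : (a :: t).count a = t1.length + 1 := by
        rw [List.count_cons_self, ← h_t, List.count_append]
        rw [List.count_eq_length.mpr (fun b hb => (ht1a b hb).symm)]
        rw [List.count_eq_zero.mpr ha_not_t2]
      have hcount_v : ∀ v ∈ t2, (a :: t).count v = t2.count v := by
        intro v hv
        have hvna : v ≠ a := hv_ne v hv
        rw [List.count_cons, ← h_t, List.count_append]
        rw [List.count_eq_zero.mpr (fun hvt1 => hvna (ht1a v hvt1))]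
        simp [Ne.symm hvna]
      have hperm_set : (a :: (PySem.Set.ofList t2 : List Int)).Perm (PySem.Set.ofList (a :: t)) := by
        rw [List.perm_ext_iff_of_nodup]
        · intro y
          simp only [List.mem_cons, PySem.Set.mem_ofList]
          constructor
          · rintro (rfl | hy)
            · exact Or.inl rfl
            · exact Or.inr (hsub.subset hy)
          · rintro (rfl | hy)
            · exact Or.inl rfl
            · rw [← h_t] at hy
              rcases List.mem_append.mp hy with h | h
              · exact Or.inl (ht1a y h)
              · exact Or.inr h
        · exact List.nodup_cons.mpr ⟨fun h => ha_not_t2 ((PySem.Set.mem_ofList _ _).mp h),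
            PySem.Set.nodup_ofList _⟩
        · exact PySem.Set.nodup_ofList _
      have hIH := ih t2 hlen2 ht2pair
      have hmapeq : (PySem.Set.ofList t2 : List Int).map (fun v => (t2.count v : Int))
          = (PySem.Set.ofList t2 : List Int).map (fun v => ((a :: t).count v : Int)) :=
        List.map_congr_left (fun v hv => by
          rw [hcount_v v ((PySem.Set.mem_ofList _ _).mp hv)])
      have hstep1 : runsSpec (a :: t) = (((a :: t).count a : Int)) :: runsSpec t2 := by
        rw [runsSpec, hcount_a]
        push_cast
        rfl
      rw [hstep1]
      refine List.Perm.trans (List.Perm.cons _ (hmapeq ▸ hIH)) ?_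
      have : ((((a :: t).count a : Int)) :: (PySem.Set.ofList t2 : List Int).map
          (fun v => ((a :: t).count v : Int)))
          = (a :: (PySem.Set.ofList t2 : List Int)).map (fun v => ((a :: t).count v : Int)) := by
        simp
      rw [this]
      exact hperm_set.map _

theorem foldpair (l : List Int) : ∀ (a b : Int),
    l.foldl (fun (mf : Int × Int) f => (max mf.1 f, min mf.2 f)) (a, b)
      = (l.foldl max a, l.foldl min b) := by
  induction l with
  | nil => intro a b; rfl
  | cons x t ih => intro a b; simpa [List.foldl_cons] using ih (max a x) (min b x)

theorem getD_zero (d : PySem.Dict Int Int) (k : Int) (h : d.contains k = false) :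
    d.getD k 0 = 0 := by
  simp [PySem.Dict.getD, PySem.Dict.contains, PySem.Dict.get?] at *
  rw [List.find?_eq_none.mpr (fun p hp => by simpa using h p.1 p.2 hp)]
  rfl

theorem dict_eq_counter (nums : List Int) :
    nums.foldl
      (fun (d : PySem.Dict Int Int) num =>
        if d.contains num then d.insert num (d.getD num 0 + 1) else d.insert num 1)
      PySem.Dict.empty = PySem.Dict.counter nums := by
  have hfun : (fun (d : PySem.Dict Int Int) num =>
      if d.contains num then d.insert num (d.getD num 0 + 1) else d.insert num 1)
      = (fun (d : PySem.Dict Int Int) x => d.insert x (d.getD x 0 + 1)) := by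
    funext d x
    by_cases h : d.contains x
    · simp [h]
    · rw [if_neg (by simp [h]), getD_zero d x (by simpa using h)]
      norm_num
  rw [hfun, PySem.Dict.foldl_insert_getD_add_one_eq_counter]

theorem values_eq_map (d : PySem.Dict Int Int) : d.values = d.items.map (fun p => p.2) := by
  rcases d with ⟨ps⟩
  exact PySem.Dict.values_mk ps

theorem main_eq (nums : List Int) (h0 : nums ≠ []) :
    sumHighestAndLowestFrequency nums = sumHighestAndLowestFrequency_alt nums := by
  have hpw := PySem.List.sorted_pairwise nums (fun x => x)
  set s := PySem.List.sorted nums (fun x => x) false with hsdef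
  have hsp : s.Perm nums := PySem.List.sorted_perm nums (fun x => x) false
  set vals := (PySem.Set.ofList nums : List Int).map (fun k => (nums.count k : Int)) with hvdef
  have hfreq : (s.foldl pvGroupStep ([], none)).1 = runsSpec s := fold_group_top s hpw
  have hperm : (runsSpec s).Perm vals := by
    refine (runsSpec_perm s.length s le_rfl hpw).trans ?_
    have hmap : (PySem.Set.ofList s : List Int).map (fun v => (s.count v : Int))
        = (PySem.Set.ofList s : List Int).map (fun v => (nums.count v : Int)) :=
      List.map_congr_left (fun v _ => by rw [hsp.count_eq])
    rw [hmap, hvdef]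
    refine List.Perm.map _ ?_
    rw [List.perm_ext_iff_of_nodup (PySem.Set.nodup_ofList _) (PySem.Set.nodup_ofList _)]
    intro y
    rw [PySem.Set.mem_ofList, PySem.Set.mem_ofList]
    exact hsp.mem_iff
  have hbounds : ∀ y ∈ vals, 1 ≤ y ∧ y ≤ (nums.length : Int) := by
    intro y hy
    rw [hvdef] at hy
    obtain ⟨k, hk, rfl⟩ := List.mem_map.mp hy
    refine ⟨?_, ?_⟩
    · exact_mod_cast List.count_pos_iff.mpr ((PySem.Set.mem_ofList _ _).mp hk)
    · exact_mod_cast List.count_le_length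
  have hne : runsSpec s ≠ [] := by
    cases hsc : s with
    | nil =>
      exact absurd ((PySem.List.sorted_eq_nil_iff nums _ false).mp (hsdef ▸ hsc)) h0
    | cons a t => rw [runsSpec]; simp
  obtain ⟨f, ft, hfq⟩ := List.exists_cons_of_ne_nil hne
  have hfmem : f ∈ vals := hperm.subset (by rw [hfq]; simp)
  have hfb := hbounds f hfmem
  have hA : sumHighestAndLowestFrequency nums
      = vals.foldl max 0 + vals.foldl min (nums.length : Int) := by
    simp only [sumHighestAndLowestFrequency]
    rw [dict_eq_counter, values_eq_map, PySem.Dict.items_counter, List.map_map, foldpair]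
    rfl
  have hB : sumHighestAndLowestFrequency_alt nums
      = (PySem.List.max? (f :: ft) (fun y => y)).getD 0
        + (PySem.List.min? (f :: ft) (fun y => y)).getD 0 := by
    simp only [sumHighestAndLowestFrequency_alt]
    rw [← hsdef, hfreq, hfq]
    simp
  have hv1 : vals.foldl max 0 = ft.foldl max f := by
    calc vals.foldl max 0 = (runsSpec s).foldl max 0 := (hperm.foldl_eq 0).symm
      _ = ft.foldl max (max 0 f) := by rw [hfq, List.foldl_cons]
      _ = ft.foldl max f := by rw [max_eq_right (le_trans zero_le_one hfb.1)]
  have hv2 : vals.foldl min (nums.length : Int) = ft.foldl min f := by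
    calc vals.foldl min (nums.length : Int) = (runsSpec s).foldl min (nums.length : Int) :=
        (hperm.foldl_eq _).symm
      _ = ft.foldl min (min (nums.length : Int) f) := by rw [hfq, List.foldl_cons]
      _ = ft.foldl min f := by rw [min_eq_right hfb.2]
  rw [hA, hB, PySem.List.max?_id_cons, PySem.List.min?_id_cons, hv1, hv2]
  rfl

-- ===== VERDICT (by name: the statement is the Claim_ definition above) =====
theorem sumHighestAndLowestFrequency_spec : Claim_equal_sumHighestAndLowestFrequency := by
  intro nums _
  unfold Spec_sumHighestAndLowestFrequency
  by_cases h0 : nums = []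
  · subst h0; decide
  · exact main_eq nums h0
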